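-- pv_equiv track=rewrite | github.com/ishanvepa/pop-music-comparative-analyzer | billboard_scraper.py | get_tonic
-- ===== SOURCE A (Python) =====
-- def findnth(word, subword, n):
--     parts = word.split(subword, n + 1)
--     if len(parts) <= n + 1:
--         return -1
--     return len(word) - len(parts[-1]) - len(subword)
--
-- def get_tonic(html):
--     songs_whole_index = []
--     songs_end_index = []
--     for k in range(10):
--         songs_end_index.insert(k, (findnth(html, "ye-chart-item__artist", k) - 20))
--         songs_end_index[k] = int(songs_end_index[k])
--         songs_whole_index.insert(k, (findnth(html, "ye-chart-item__title", k)))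
--         songs_whole_index[k] = int(songs_whole_index[k])
--     songs = []
--     #retrieve songs and format properly in list
--     for k in range(10):
--         songs.insert(k, html[songs_whole_index[k]:songs_end_index[k]])
--
--         escape_char = songs[k].find("\n")
--
--         while escape_char > 0:
--             escape_char = songs[k].find("\n") + 1
--             songs[k] = songs[k][escape_char:]
--     return songs
-- ===== SOURCE B (Python) =====
-- def get_tonic(html):
--     title_tag = "ye-chart-item__title"
--     artist_tag = "ye-chart-item__artist"
--     songs = []
--     t_cur = a_cur = 0
--     for _ in range(10):
--         t = html.find(title_tag, t_cur)
--         a = html.find(artist_tag, a_cur)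
--         if t != -1:
--             t_cur = t + len(title_tag)
--         if a != -1:
--             a_cur = a + len(artist_tag)
--         s = html[t:a - 20]
--         if s.find("\n") > 0:
--             s = s[s.rfind("\n") + 1:]
--         songs.append(s)
--     return songs
-- ===== Notes on version B (the rewrite author's own statement) =====
-- stated objective: alternative
-- what changed: A re-splits the whole page with str.split(marker, k+1) for each of the 20 (marker, k) lookups and strips trailing text with an iterated find/slice loop; B keeps one advancing cursor per marker and calls str.find(marker, cursor) once per iteration of a single loop, stripping with a single rfind slice.
import Mathlib
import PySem

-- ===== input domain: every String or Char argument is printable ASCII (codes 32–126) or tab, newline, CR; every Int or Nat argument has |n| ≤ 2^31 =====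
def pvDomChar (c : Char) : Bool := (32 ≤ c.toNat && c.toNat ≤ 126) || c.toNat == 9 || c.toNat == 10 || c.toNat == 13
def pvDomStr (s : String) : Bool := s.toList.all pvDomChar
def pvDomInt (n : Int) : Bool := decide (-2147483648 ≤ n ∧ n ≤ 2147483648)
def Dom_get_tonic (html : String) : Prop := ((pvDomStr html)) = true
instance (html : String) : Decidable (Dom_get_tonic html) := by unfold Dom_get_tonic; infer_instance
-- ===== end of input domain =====

-- B replaces A's per-k re-splitting of the whole page (findnth via str.split for each of 20 lookups)
-- by a single loop that advances one cursor per marker with str.find(sub, cursor); objective: alternative.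


-- the two marker literals of the Python source
def pvTitleMarker : List Char := "ye-chart-item__title".toList
def pvArtistMarker : List Char := "ye-chart-item__artist".toList

-- ===== PORT A =====

-- findnth(word, subword, n): parts = word.split(subword, n+1); -1 if too few parts, else
-- len(word) - len(parts[-1]) - len(subword).  splitMax? is none only for subword = "" and
-- parts is never empty, so .getD is unreachable for the two nonempty markers A passes in.
def findnthA (word subword : List Char) (n : Int) : Int :=
  let parts := (PySem.Chars.splitMax? word subword (n + 1)).getD []
  if (parts.length : Int) ≤ n + 1 then -1
  else (word.length : Int) - ((PySem.List.pyGetD parts (-1) []).length : Int) - (subword.length : Int)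

-- termination helper for the newline-stripping while loop (cited by decreasing_by)
theorem pvFindDropLt (s : List Char) (j : Int) (hj : 0 ≤ j)
    (h : PySem.Chars.find s ['\n'] = j) :
    (s.drop (j + 1).toNat).length < s.length := by
  have hinf : ['\n'] <:+: s := by
    have := (PySem.Chars.find_nonneg_iff (s := s) (sub := ['\n'])).mp (by omega)
    exact this
  have hne : s ≠ [] := by
    rintro rfl
    simp [List.infix_nil] at hinf
  have hlen : 0 < s.length := List.length_pos_iff.mpr hne
  have : 0 < (j + 1).toNat := by omega
  simp only [List.length_drop]
  omega

-- A's inner loop:  escape_char = s.find("\n");  while escape_char > 0: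
--   escape_char = s.find("\n") + 1;  s = s[escape_char:]
def stripGo (s : List Char) (esc : Int) : List Char :=
  if 0 < esc then
    let e := PySem.Chars.find s ['\n'] + 1
    stripGo (PySem.Chars.slice s (some e) none) e
  else s
termination_by 2 * s.length + (if 0 < esc then 1 else 0)
decreasing_by
  have hge : -1 ≤ PySem.Chars.find s ['\n'] := PySem.Chars.neg_one_le_find s ['\n']
  have hslice : PySem.Chars.slice s (some (PySem.Chars.find s ['\n'] + 1)) none
      = s.drop (PySem.Chars.find s ['\n'] + 1).toNat := by
    rw [PySem.Chars.slice_eq_listSlice]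
    exact PySem.List.slice_from s (by omega)
  rw [hslice]
  by_cases h0 : 0 ≤ PySem.Chars.find s ['\n']
  · -- found at j ≥ 0 : the slice drops at least one character
    have hlt := pvFindDropLt s (PySem.Chars.find s ['\n']) h0 rfl
    split <;> omega
  · -- not found: find = -1 (PySem.Chars.neg_one_le_find), e = 0, next test fails
    have hj1 : PySem.Chars.find s ['\n'] = -1 := by omega
    simp [hj1]
    split <;> omega

def get_tonic (html : String) : List String :=
  let h := html.toList
  -- first loop: build songs_end_index / songs_whole_index via findnth (int(...) is the identity here)
  let idx := (PySem.List.pyRange 0 10 1).foldl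
    (fun (st : List Int × List Int) k =>
      (st.1 ++ [findnthA h pvArtistMarker k - 20], st.2 ++ [findnthA h pvTitleMarker k]))
    ([], [])
  -- second loop: slice and strip ('songs_*_index[k]' always has index 0 ≤ k < 10 in range: pyGetD exact)
  let songs := (PySem.List.pyRange 0 10 1).foldl
    (fun (songs : List (List Char)) k =>
      let s := PySem.Chars.slice h (some (PySem.List.pyGetD idx.2 k 0)) (some (PySem.List.pyGetD idx.1 k 0))
      songs ++ [stripGo s (PySem.Chars.find s ['\n'])])
    []
  songs.map String.ofList

-- ===== PORT B =====

-- B's loop body, a helper of the port: t = html.find(title_tag, t_cur); a = html.find(artist_tag, a_cur);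
-- cursors advance past a found occurrence; slice and strip to the last line.
def altStep (h : List Char) (st : List (List Char) × Int × Int) (_k : Int) :
    List (List Char) × Int × Int :=
  let t := PySem.Chars.findFrom h pvTitleMarker st.2.1 none
  let a := PySem.Chars.findFrom h pvArtistMarker st.2.2 none
  let tc := if t ≠ -1 then t + (pvTitleMarker.length : Int) else st.2.1
  let ac := if a ≠ -1 then a + (pvArtistMarker.length : Int) else st.2.2
  let s := PySem.Chars.slice h (some t) (some (a - 20))
  let s2 := if 0 < PySem.Chars.find s ['\n']
            then PySem.Chars.slice s (some (PySem.Chars.rfind s ['\n'] + 1)) none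
            else s
  (st.1 ++ [s2], tc, ac)

def get_tonic_alt (html : String) : List String :=
  let h := html.toList
  (((PySem.List.pyRange 0 10 1).foldl (altStep h) ([], 0, 0)).1).map String.ofList

-- ===== PRECONDITION & SPEC =====
def Spec_get_tonic (html : String) (out : List String) : Prop := out = get_tonic_alt html
instance (html : String) (out : List String) : Decidable (Spec_get_tonic html out) := by unfold Spec_get_tonic; infer_instance

-- ===== CLAIM (what is proved, stated in full; the proofs are below) =====
def Claim_equal_get_tonic : Prop := ∀ (html : String), Dom_get_tonic html → Spec_get_tonic html (get_tonic html)

-- ===== LEMMAS AND PROOFS =====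

-- ---- generic facts about Chars.find ----

theorem pvPrefixDrop_infix {s sub : List Char} {r : Nat} (hw : sub <+: s.drop r) :
    sub <:+: s :=
  hw.isInfix.trans (s.drop_suffix r).isInfix

theorem pvFind_eq_coe (s sub : List Char) (r : Nat) (hw : sub <+: s.drop r)
    (hmin : ∀ i < r, ¬ sub <+: s.drop i) : PySem.Chars.find s sub = r := by
  have h0 : 0 ≤ PySem.Chars.find s sub :=
    (PySem.Chars.find_nonneg_iff s sub).mpr (pvPrefixDrop_infix hw)
  obtain ⟨hpre, hlt⟩ := PySem.Chars.find_spec h0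
  rcases Nat.lt_trichotomy (PySem.Chars.find s sub).toNat r with h | h | h
  · exact absurd hpre (hmin _ h)
  · omega
  · exact absurd hw (hlt r h)

theorem pvNot_prefix_drop_of_find_neg {s sub : List Char}
    (h : PySem.Chars.find s sub = -1) : ∀ i, ¬ sub <+: s.drop i := by
  intro i hi
  have hin : PySem.Chars.isIn sub s = true :=
    (PySem.Chars.exists_prefix_drop_iff_isIn sub s).mp ⟨i, hi⟩
  have := (PySem.Chars.find_eq_neg_one_iff s sub).mp h
  exact this ((PySem.Chars.isIn_iff_infix sub s).mp hin)

theorem pvFind_neg (s sub : List Char) (h : ∀ i, ¬ sub <+: s.drop i) :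
    PySem.Chars.find s sub = -1 := by
  rw [PySem.Chars.find_eq_neg_one_iff]
  intro hinf
  have : PySem.Chars.isIn sub s = true := (PySem.Chars.isIn_iff_infix sub s).mpr hinf
  obtain ⟨j, hj⟩ := (PySem.Chars.exists_prefix_drop_iff_isIn sub s).mpr this
  exact h j hj

-- ---- a reference model of str.split(sep, m): the list of parts ----

def pvModel (sep : List Char) : Nat → List Char → List (List Char)
  | 0, l => [l]
  | m + 1, l =>
      if PySem.Chars.find l sep < 0 then [l]
      else l.take (PySem.Chars.find l sep).toNat ::
        pvModel sep m (l.drop ((PySem.Chars.find l sep).toNat + sep.length))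

theorem pvModel_ne_nil (sep : List Char) (m : Nat) (l : List Char) :
    pvModel sep m l ≠ [] := by
  cases m <;> simp [pvModel] <;> split <;> simp

def pvConsHead (c : List Char) : List (List Char) → List (List Char)
  | [] => [c]
  | p :: ps => (c ++ p) :: ps

theorem pvConsHead_nil_of_ne (ps : List (List Char)) (h : ps ≠ []) :
    pvConsHead [] ps = ps := by
  cases ps with
  | nil => exact absurd rfl h
  | cons p ps => simp [pvConsHead]

theorem pvGetLastD_irrel {α : Type} (l : List α) (h : l ≠ []) (d1 d2 : α) :
    l.getLastD d1 = l.getLastD d2 := by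
  cases l with
  | nil => exact absurd rfl h
  | cons x xs => rw [List.getLastD_cons, List.getLastD_cons]

-- ---- splitOnMax.go computes pvModel ----

theorem pvGo_eq (sep : List Char) (hsep : sep ≠ []) :
    ∀ fuel m (l cur : List Char) (acc : List (List Char)), l.length + 1 ≤ fuel →
      PySem.Chars.splitOnMax.go sep fuel m l cur acc
        = acc.reverse ++ pvConsHead cur.reverse (pvModel sep m l) := by
  intro fuel
  induction fuel with
  | zero => intro m l cur acc h; omega
  | succ f ih =>
    intro m l cur acc h
    have hsl : 1 ≤ sep.length := List.length_pos_iff.mpr hsep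
    cases l with
    | nil =>
      have hfind : PySem.Chars.find [] sep = -1 := by
        apply pvFind_neg
        intro i hi
        simp at hi
        exact hsep hi
      cases m with
      | zero =>
        rw [PySem.Chars.splitOnMax.go] <;> try omega
        simp [pvModel, pvConsHead]
      | succ m' =>
        rw [PySem.Chars.splitOnMax.go] <;> try omega
        simp [pvModel, hfind, pvConsHead]
    | cons c rest =>
      cases m with
      | zero =>
        rw [PySem.Chars.splitOnMax.go] <;> try omega
        simp [pvModel, pvConsHead]
      | succ m' =>
        rw [PySem.Chars.splitOnMax.go] <;> try omega
        simp only [Nat.succ_ne_zero, if_false]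
        by_cases hp : sep.isPrefixOf (c :: rest)
        · have hpre : sep <+: (c :: rest) := by
            rwa [← List.isPrefixOf_iff_prefix]
          have hfind : PySem.Chars.find (c :: rest) sep = 0 :=
            pvFind_eq_coe _ _ 0 (by simpa using hpre) (by intro i hi; omega)
          have hlen : sep.length ≤ (c :: rest).length := hpre.length_le
          rw [if_pos hp, show m' + 1 - 1 = m' from rfl, ih m' _ [] _ (by simp at h ⊢; omega)]
          simp only [pvModel, hfind]
          norm_num
          rw [pvConsHead_nil_of_ne _ (pvModel_ne_nil _ _ _)]
          simp [pvConsHead]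
        · rw [if_neg hp, ih (m' + 1) rest (c :: cur) acc (by simp at h ⊢; omega)]
          have hnp : ¬ sep <+: (c :: rest) := by
            simpa [List.isPrefixOf_iff_prefix] using hp
          rcases lt_or_ge (PySem.Chars.find (c :: rest) sep) 0 with hf | hf
          · -- no occurrence in l at all
            have hfl : PySem.Chars.find (c :: rest) sep = -1 := by
              have := PySem.Chars.neg_one_le_find (c :: rest) sep
              omega
            have hall := pvNot_prefix_drop_of_find_neg hfl
            have hfr : PySem.Chars.find rest sep = -1 := by
              apply pvFind_neg
              intro i hi
              exact hall (i + 1) (by simpa using hi)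
            simp [pvModel, hfl, hfr, pvConsHead]
          · -- first occurrence at j > 0
            obtain ⟨hpre, hmin⟩ := PySem.Chars.find_spec hf
            set j : Nat := (PySem.Chars.find (c :: rest) sep).toNat with hj
            have hj0 : j ≠ 0 := by
              intro h0
              rw [h0] at hpre
              simpa using hnp hpre
            have hfr : PySem.Chars.find rest sep = (j - 1 : Nat) :=
              pvFind_eq_coe rest sep (j - 1)
                (by
                  have : rest.drop (j - 1) = (c :: rest).drop j := by
                    conv_rhs => rw [show j = (j-1) + 1 by omega]
                    simp
                  rw [this]; exact hpre)
                (by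
                  intro i hi hip
                  exact hmin (i + 1) (by omega) (by simpa using hip))
            have hfl : PySem.Chars.find (c :: rest) sep = (j : Int) := by omega
            have hjr : ¬ (j : Int) < 0 := by omega
            have hjr2 : ¬ ((j - 1 : Nat) : Int) < 0 := by omega
            simp only [pvModel, hfl, hfr, if_neg hjr, if_neg hjr2, Int.toNat_natCast]
            have ht : (c :: rest).take j = c :: rest.take (j - 1) := by
              conv_lhs => rw [show j = (j-1) + 1 by omega]
              simp
            have hd : (c :: rest).drop (j + sep.length) = rest.drop ((j - 1) + sep.length) := by
              conv_lhs => rw [show j + sep.length = ((j-1) + sep.length) + 1 by omega]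
              simp
            rw [ht, hd]
            simp [pvConsHead]

theorem pvSplit_eq_model (l sub : List Char) (hsub : sub ≠ []) (n : Nat) :
    (PySem.Chars.splitMax? l sub ((n : Int) + 1)).getD [] = pvModel sub (n + 1) l := by
  have hne : ¬ sub.isEmpty = true := by simpa using hsub
  have hnn : ¬ ((n : Int) + 1) < 0 := by omega
  rw [PySem.Chars.splitMax?, if_neg hne]
  rw [Option.getD_some, PySem.Chars.splitOnMax, if_neg hnn]
  rw [pvGo_eq sub hsub _ _ _ _ _ (by omega)]
  have htn : ((n : Int) + 1).toNat = n + 1 := by omega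
  rw [htn]
  simp [pvConsHead_nil_of_ne _ (pvModel_ne_nil _ _ _)]

-- ---- A's findnth through the model ----

theorem pvFindnthA_eq (l sub : List Char) (hsub : sub ≠ []) (k : Nat) :
    findnthA l sub (k : Int)
      = if (pvModel sub (k + 1) l).length ≤ k + 1 then -1
        else (l.length : Int) - ((pvModel sub (k + 1) l).getLastD []).length - sub.length := by
  simp only [findnthA]
  rw [pvSplit_eq_model l sub hsub k]
  have hne := pvModel_ne_nil sub (k + 1) l
  have hlast : PySem.List.pyGetD (pvModel sub (k + 1) l) (-1) []
      = (pvModel sub (k + 1) l).getLastD [] := by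
    rw [PySem.List.pyGetD_neg_one _ _ hne, List.getLastD_eq_getLast?,
      List.getLast?_eq_getLast hne, Option.getD_some]
  rw [hlast]
  by_cases hlen : (pvModel sub (k + 1) l).length ≤ k + 1
  · rw [if_pos (by exact_mod_cast by omega), if_pos hlen]
  · rw [if_neg (by omega), if_neg hlen]

-- ---- a reference model of B's cursor scan: the list of absolute positions ----

def posGo (sub : List Char) : Nat → Nat → List Char → List Int
  | 0, _, _ => []
  | fuel + 1, off, rest =>
    let j := PySem.Chars.find rest sub
    if j < 0 then []
    else ((off : Int) + j) :: posGo sub fuel (off + j.toNat + sub.length) (rest.drop (j.toNat + sub.length))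

def positionsB (h sub : List Char) : List Int := posGo sub (h.length + 1) 0 h

theorem pvPos_model (sub : List Char) (hsub : sub ≠ []) :
    ∀ (k : Nat) (l : List Char) (off fuel : Nat), l.length + 1 ≤ fuel →
      (posGo sub fuel off l).getD k (-1)
        = if (pvModel sub (k + 1) l).length ≤ k + 1 then (-1 : Int)
          else (off : Int) + l.length - ((pvModel sub (k + 1) l).getLastD []).length - sub.length := by
  intro k
  induction k with
  | zero =>
    intro l off fuel hfuel
    obtain ⟨f, rfl⟩ : ∃ f, fuel = f + 1 := ⟨fuel - 1, by omega⟩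
    rcases lt_or_ge (PySem.Chars.find l sub) 0 with hf | hf
    · simp only [posGo, if_pos hf]
      simp [pvModel, hf]
    · obtain ⟨hpre, _⟩ := PySem.Chars.find_spec hf
      have hs1 : 0 < sub.length := List.length_pos_iff.mpr hsub
      have hjb : (PySem.Chars.find l sub).toNat + sub.length ≤ l.length := by
        have h2 := hpre.length_le
        rw [List.length_drop] at h2
        omega
      simp only [posGo, if_neg (by omega : ¬ PySem.Chars.find l sub < 0)]
      simp only [List.getD_cons_zero]
      have hM : pvModel sub (0 + 1) l = [l.take (PySem.Chars.find l sub).toNat,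
          l.drop ((PySem.Chars.find l sub).toNat + sub.length)] := by
        simp [pvModel, if_neg (by omega : ¬ PySem.Chars.find l sub < 0)]
      rw [hM, if_neg (by simp)]
      simp only [List.getLastD_cons, List.getLastD_nil, List.length_drop]
      omega
  | succ k' ih =>
    intro l off fuel hfuel
    obtain ⟨f, rfl⟩ : ∃ f, fuel = f + 1 := ⟨fuel - 1, by omega⟩
    rcases lt_or_ge (PySem.Chars.find l sub) 0 with hf | hf
    · simp only [posGo, if_pos hf]
      simp [pvModel, hf]
    · obtain ⟨hpre, _⟩ := PySem.Chars.find_spec hf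
      have hsl : 1 ≤ sub.length := List.length_pos_iff.mpr hsub
      have hs1 : 0 < sub.length := List.length_pos_iff.mpr hsub
      have hjb : (PySem.Chars.find l sub).toNat + sub.length ≤ l.length := by
        have h2 := hpre.length_le
        rw [List.length_drop] at h2
        omega
      simp only [posGo, if_neg (by omega : ¬ PySem.Chars.find l sub < 0)]
      simp only [List.getD_cons_succ]
      rw [ih (l.drop ((PySem.Chars.find l sub).toNat + sub.length)) _ f
        (by simp [List.length_drop]; omega)]
      have hM := pvModel_ne_nil sub (k' + 1) (l.drop ((PySem.Chars.find l sub).toNat + sub.length))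
      conv_rhs => rw [pvModel]
      rw [if_neg (by omega : ¬ PySem.Chars.find l sub < 0)]
      simp only [List.length_cons]
      have hlast : ∀ (a : List Char),
          ((l.take (PySem.Chars.find l sub).toNat) ::
            pvModel sub (k' + 1) (l.drop ((PySem.Chars.find l sub).toNat + sub.length))).getLastD a
          = (pvModel sub (k' + 1) (l.drop ((PySem.Chars.find l sub).toNat + sub.length))).getLastD [] := by
        intro a
        rw [List.getLastD_cons]
        exact pvGetLastD_irrel _ hM _ _
      rw [hlast]
      by_cases hc : (pvModel sub (k' + 1) (l.drop ((PySem.Chars.find l sub).toNat + sub.length))).length ≤ k' + 1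
      · rw [if_pos hc, if_pos (by omega)]
      · rw [if_neg hc, if_neg (by omega)]
        simp only [List.length_drop]
        push_cast
        omega

-- ---- rfind characterisation ----

theorem pvRgo_spec (s sub : List Char) :
    ∀ k : Nat,
      (PySem.Chars.rfind.go s sub k = -1 ∧ ∀ i ≤ k, ¬ sub <+: s.drop i) ∨
      (∃ r : Nat, PySem.Chars.rfind.go s sub k = r ∧ r ≤ k ∧ sub <+: s.drop r ∧
        ∀ i, r < i → i ≤ k → ¬ sub <+: s.drop i) := by
  intro k
  induction k with
  | zero =>
    rw [PySem.Chars.rfind.go]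
    by_cases hp : sub.isPrefixOf s
    · right
      refine ⟨0, by simp [hp], le_refl 0, ?_, by omega⟩
      simpa using (List.isPrefixOf_iff_prefix).mp hp
    · left
      refine ⟨by simp [hp], ?_⟩
      intro i hi
      interval_cases i
      simpa [List.isPrefixOf_iff_prefix] using hp
  | succ k' ih =>
    rw [PySem.Chars.rfind.go]
    by_cases hp : sub.isPrefixOf (s.drop (k' + 1))
    · right
      exact ⟨k' + 1, by simp [hp], le_refl _, (List.isPrefixOf_iff_prefix).mp hp, by omega⟩
    · have hnp : ¬ sub <+: s.drop (k' + 1) := by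
        simpa [List.isPrefixOf_iff_prefix] using hp
      rcases ih with ⟨he, hall⟩ | ⟨r, he, hr, hw, hmax⟩
      · left
        refine ⟨by simp [hp, he], ?_⟩
        intro i hi
        rcases Nat.lt_or_ge i (k' + 1) with h | h
        · exact hall i (by omega)
        · have : i = k' + 1 := by omega
          rw [this]; exact hnp
      · right
        refine ⟨r, by simp [hp, he], by omega, hw, ?_⟩
        intro i h1 h2
        rcases Nat.lt_or_ge i (k' + 1) with h | h
        · exact hmax i h1 (by omega)
        · have : i = k' + 1 := by omega
          rw [this]; exact hnp

theorem pvRfind_spec (s sub : List Char) (hsub : sub ≠ [])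
    (hocc : ∃ i, sub <+: s.drop i) :
    ∃ r : Nat, PySem.Chars.rfind s sub = r ∧ sub <+: s.drop r ∧
      ∀ i, r < i → ¬ sub <+: s.drop i := by
  have hlen : ∀ i, sub <+: s.drop i → i ≤ s.length := by
    intro i hi
    by_contra hgt
    rw [List.drop_of_length_le (by omega)] at hi
    exact hsub (List.prefix_nil.mp hi)
  rcases pvRgo_spec s sub s.length with ⟨_, hall⟩ | ⟨r, he, _, hw, hmax⟩
  · obtain ⟨i, hi⟩ := hocc
    exact absurd hi (hall i (hlen i hi))
  · refine ⟨r, he, hw, ?_⟩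
    intro i hri hi
    rcases Nat.lt_or_ge s.length i with h | h
    · rw [List.drop_of_length_le (by omega)] at hi
      exact hsub (List.prefix_nil.mp hi)
    · exact hmax i hri h hi

-- ---- the newline strip loop ----

def pvTail (s : List Char) : List Char :=
  if PySem.Chars.find s ['\n'] < 0 then s
  else s.drop ((PySem.Chars.rfind s ['\n']).toNat + 1)

theorem pvStrip_neg (s : List Char) (esc : Int)
    (hf : PySem.Chars.find s ['\n'] = -1) (hesc : 0 < esc) :
    stripGo s esc = s := by
  rw [stripGo, if_pos hesc, hf]
  norm_num
  rw [stripGo, if_neg (by omega)]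

theorem pvStrip_pos : ∀ (n : Nat) (s : List Char), s.length ≤ n →
    ∀ esc : Int, 0 < esc → stripGo s esc = pvTail s := by
  intro n
  induction n with
  | zero =>
    intro s hs esc hesc
    have hnil : s = [] := List.length_eq_zero_iff.mp (by omega)
    subst hnil
    have hf : PySem.Chars.find [] ['\n'] = -1 := by decide
    rw [pvStrip_neg _ _ hf hesc, pvTail, if_pos (by omega)]
  | succ n' ih =>
    intro s hs esc hesc
    rcases lt_or_ge (PySem.Chars.find s ['\n']) 0 with hf | hf
    · have hf1 : PySem.Chars.find s ['\n'] = -1 := by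
        have := PySem.Chars.neg_one_le_find s ['\n']
        omega
      rw [pvStrip_neg _ _ hf1 hesc, pvTail, if_pos (by omega)]
    · -- find = j ≥ 0
      obtain ⟨hpre, _⟩ := PySem.Chars.find_spec hf
      set j : Nat := (PySem.Chars.find s ['\n']).toNat with hj
      have hjlt : j < s.length := by
        have := hpre.length_le
        simp at this
        omega
      have hslice : PySem.Chars.slice s (some (PySem.Chars.find s ['\n'] + 1)) none
          = s.drop (j + 1) := by
        rw [PySem.Chars.slice_eq_listSlice, PySem.List.slice_from s (by omega)]
        congr 1
        omega
      rw [stripGo, if_pos hesc]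
      simp only [hslice]
      rw [ih (s.drop (j + 1)) (by simp [List.length_drop]; omega) _ (by omega)]
      -- pvTail (s.drop (j+1)) = pvTail s
      rcases lt_or_ge (PySem.Chars.find (s.drop (j + 1)) ['\n']) 0 with hf' | hf'
      · -- no further newline: the one at j is the last
        have hf1 : PySem.Chars.find (s.drop (j + 1)) ['\n'] = -1 := by
          have := PySem.Chars.neg_one_le_find (s.drop (j + 1)) ['\n']
          omega
        have hall := pvNot_prefix_drop_of_find_neg hf1
        have hrf : PySem.Chars.rfind s ['\n'] = (j : Int) := by
          obtain ⟨r, he, hw, hmax⟩ := pvRfind_spec s ['\n'] (by simp) ⟨j, hpre⟩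
          have hrj : r = j := by
            rcases Nat.lt_trichotomy r j with h | h | h
            · exact absurd hpre (hmax j h)
            · exact h
            · exfalso
              have := hall (r - (j + 1))
              rw [List.drop_drop] at this
              exact this (by rwa [show j + 1 + (r - (j + 1)) = r by omega])
          rw [he, hrj]
        rw [pvTail, if_pos hf', pvTail, if_neg (by omega), hrf]
        simp
      · -- further newlines: last of s is (j+1) + last of the suffix
        have hocc' : ∃ i, ['\n'] <+: (s.drop (j + 1)).drop i := by
          obtain ⟨hpre', _⟩ := PySem.Chars.find_spec hf'
          exact ⟨_, hpre'⟩
        obtain ⟨r', he', hw', hmax'⟩ := pvRfind_spec (s.drop (j + 1)) ['\n'] (by simp) hocc'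
        have hrf : PySem.Chars.rfind s ['\n'] = ((j + 1 + r' : Nat) : Int) := by
          obtain ⟨r, he, hw, hmax⟩ := pvRfind_spec s ['\n'] (by simp) ⟨j, hpre⟩
          have hw'' : ['\n'] <+: s.drop (j + 1 + r') := by
            rwa [← List.drop_drop]
          have hrj : r = j + 1 + r' := by
            rcases Nat.lt_trichotomy r (j + 1 + r') with h | h | h
            · exact absurd hw'' (hmax _ h)
            · exact h
            · exfalso
              rcases Nat.lt_or_ge r (j + 1) with h2 | h2
              · omega
              · have := hmax' (r - (j + 1)) (by omega)
                rw [List.drop_drop] at this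
                exact this (by rwa [show j + 1 + (r - (j + 1)) = r by omega])
          rw [he, hrj]
        rw [pvTail, if_neg (by omega), pvTail, if_neg (by omega), he', hrf]
        rw [List.drop_drop]
        congr 1

theorem strip_eq_proof (s : List Char) :
    stripGo s (PySem.Chars.find s ['\n'])
      = (if 0 < PySem.Chars.find s ['\n']
         then PySem.Chars.slice s (some (PySem.Chars.rfind s ['\n'] + 1)) none
         else s) := by
  rcases lt_or_ge 0 (PySem.Chars.find s ['\n']) with hpos | hnp
  · rw [if_pos hpos, pvStrip_pos s.length s (le_refl _) _ hpos]
    have hf : 0 ≤ PySem.Chars.find s ['\n'] := by omega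
    obtain ⟨hpre, _⟩ := PySem.Chars.find_spec hf
    obtain ⟨r, he, hw, hmax⟩ := pvRfind_spec s ['\n'] (by simp) ⟨_, hpre⟩
    rw [pvTail, if_neg (by omega), he]
    rw [PySem.Chars.slice_eq_listSlice, PySem.List.slice_from s (by omega)]
    congr 1
  · rw [if_neg (by omega), stripGo, if_neg (by omega)]

theorem pvMain_bridge (h sub : List Char) (hsub : sub ≠ []) (k : Nat) :
    (positionsB h sub).getD k (-1) = findnthA h sub (k : Int) := by
  rw [positionsB, pvPos_model sub hsub k h 0 (h.length + 1) (by omega),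
    pvFindnthA_eq h sub hsub k]
  by_cases hc : (pvModel sub (k + 1) h).length ≤ k + 1
  · rw [if_pos hc, if_pos hc]
  · rw [if_neg hc, if_neg hc]
    ring

theorem pvMarkerT_ne : pvTitleMarker ≠ [] := by decide
theorem pvMarkerA_ne : pvArtistMarker ≠ [] := by decide

-- ---- B's cursor iteration computes the position list ----

-- one cursor update of B's loop, for one marker
def pvCurStep (h sub : List Char) (c : Int) : Int :=
  let t := PySem.Chars.findFrom h sub c none
  if t ≠ -1 then t + (sub.length : Int) else c

theorem pvIter (h sub : List Char) (hsub : sub ≠ []) :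
    ∀ (m : Nat) (c : Nat) (fuel : Nat), c ≤ h.length → (h.drop c).length + 1 ≤ fuel →
      PySem.Chars.findFrom h sub ((pvCurStep h sub)^[m] (c : Int)) none
        = (posGo sub fuel c (h.drop c)).getD m (-1) := by
  intro m
  induction m with
  | zero =>
    intro c fuel hc hfuel
    obtain ⟨f, rfl⟩ : ∃ f, fuel = f + 1 := ⟨fuel - 1, by omega⟩
    simp only [Function.iterate_zero, id_eq]
    rw [PySem.Chars.findFrom_natCast h sub c hc]
    rcases lt_or_ge (PySem.Chars.find (h.drop c) sub) 0 with hf | hf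
    · have hf1 : PySem.Chars.find (h.drop c) sub = -1 := by
        have := PySem.Chars.neg_one_le_find (h.drop c) sub
        omega
      simp [posGo, hf1]
    · have hne : PySem.Chars.find (h.drop c) sub ≠ -1 := by omega
      simp only [posGo, if_neg (by omega : ¬ PySem.Chars.find (h.drop c) sub < 0)]
      simp [hne]
  | succ m' ih =>
    intro c fuel hc hfuel
    obtain ⟨f, rfl⟩ : ∃ f, fuel = f + 1 := ⟨fuel - 1, by omega⟩
    rw [Function.iterate_succ_apply]
    rcases lt_or_ge (PySem.Chars.find (h.drop c) sub) 0 with hf | hf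
    · -- stuck cursor: find fails, cursor unchanged, result stays -1
      have hf1 : PySem.Chars.find (h.drop c) sub = -1 := by
        have := PySem.Chars.neg_one_le_find (h.drop c) sub
        omega
      have hstep : pvCurStep h sub (c : Int) = (c : Int) := by
        rw [pvCurStep]
        rw [PySem.Chars.findFrom_natCast h sub c hc, hf1]
        simp
      rw [hstep, ih c (f + 1) hc hfuel]
      simp [posGo, hf1]
    · -- found at j: cursor advances past the occurrence
      obtain ⟨hpre, _⟩ := PySem.Chars.find_spec hf
      set j : Nat := (PySem.Chars.find (h.drop c) sub).toNat with hj
      have hs1 : 0 < sub.length := List.length_pos_iff.mpr hsub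
      have hjb : j + sub.length ≤ (h.drop c).length := by
        have h2 := hpre.length_le
        rw [List.length_drop] at h2
        simp only [List.length_drop] at *
        omega
      have hstep : pvCurStep h sub (c : Int) = ((c + j + sub.length : Nat) : Int) := by
        rw [pvCurStep]
        rw [PySem.Chars.findFrom_natCast h sub c hc]
        have hne : PySem.Chars.find (h.drop c) sub ≠ -1 := by omega
        rw [if_neg hne,
          if_pos (show ((c : Int) + PySem.Chars.find (h.drop c) sub ≠ -1) by omega)]
        push_cast
        omega
      have hdrop : h.drop (c + j + sub.length) = (h.drop c).drop (j + sub.length) := by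
        rw [List.drop_drop]
        congr 1
        omega
      have hclen : c + j + sub.length ≤ h.length := by
        simp only [List.length_drop] at hjb ⊢
        omega
      rw [hstep, ih (c + j + sub.length) f hclen
        (by rw [hdrop]; simp only [List.length_drop] at *; omega)]
      simp only [posGo, if_neg (by omega : ¬ PySem.Chars.find (h.drop c) sub < 0)]
      rw [List.getD_cons_succ, hdrop]

theorem pvIter_findnth (h sub : List Char) (hsub : sub ≠ []) (m : Nat) :
    PySem.Chars.findFrom h sub ((pvCurStep h sub)^[m] (0 : Int)) none
      = findnthA h sub (m : Int) := by
  have h0 : ((0 : Nat) : Int) = (0 : Int) := rfl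
  rw [← h0, pvIter h sub hsub m 0 (h.length + 1) (by omega) (by simp), ← pvMain_bridge h sub hsub m]
  rw [positionsB]
  simp

-- ---- B's fold unwound into a map ----

def pvSong (h : List Char) (j : Nat) : List Char :=
  let t := PySem.Chars.findFrom h pvTitleMarker ((pvCurStep h pvTitleMarker)^[j] (0 : Int)) none
  let a := PySem.Chars.findFrom h pvArtistMarker ((pvCurStep h pvArtistMarker)^[j] (0 : Int)) none
  let s := PySem.Chars.slice h (some t) (some (a - 20))
  if 0 < PySem.Chars.find s ['\n']
  then PySem.Chars.slice s (some (PySem.Chars.rfind s ['\n'] + 1)) none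
  else s

theorem pvFoldB (h : List Char) :
    ∀ (ks : List Int) (m : Nat) (songs : List (List Char)),
      (ks.foldl (altStep h)
        (songs, (pvCurStep h pvTitleMarker)^[m] (0 : Int), (pvCurStep h pvArtistMarker)^[m] (0 : Int))).1
      = songs ++ (List.range ks.length).map (fun i => pvSong h (m + i)) := by
  intro ks
  induction ks with
  | nil => intro m songs; simp
  | cons k ks ih =>
    intro m songs
    rw [List.foldl_cons]
    have hstep : altStep h
        (songs, (pvCurStep h pvTitleMarker)^[m] (0 : Int), (pvCurStep h pvArtistMarker)^[m] (0 : Int)) k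
        = (songs ++ [pvSong h m],
           (pvCurStep h pvTitleMarker)^[m + 1] (0 : Int),
           (pvCurStep h pvArtistMarker)^[m + 1] (0 : Int)) := by
      rw [altStep, pvSong]
      rw [Function.iterate_succ_apply', Function.iterate_succ_apply']
      rfl
    rw [hstep, ih (m + 1) (songs ++ [pvSong h m])]
    rw [List.length_cons, List.range_succ_eq_map]
    simp only [List.map_cons, List.map_map, Nat.add_zero]
    rw [List.append_assoc, List.singleton_append]
    congr 2
    apply List.map_congr_left
    intro i _
    simp only [Function.comp_apply]
    congr 1
    omega

-- ===== VERDICT (by name: the statement is the Claim_ definition above) =====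
theorem get_tonic_spec : Claim_equal_get_tonic := by
  intro html _
  unfold Spec_get_tonic
  simp only [get_tonic, get_tonic_alt]
  rw [PySem.List.foldl_prod_mk
    (fun a e => a ++ [findnthA html.toList pvArtistMarker e - 20])
    (fun a e => a ++ [findnthA html.toList pvTitleMarker e])]
  simp only [PySem.List.foldl_append_singleton_eq_map, List.nil_append]
  rw [show ((0 : Int), (0 : Int)) = ((pvCurStep html.toList pvTitleMarker)^[0] (0 : Int),
      (pvCurStep html.toList pvArtistMarker)^[0] (0 : Int)) from rfl]
  rw [pvFoldB html.toList (PySem.List.pyRange 0 10 1) 0 []]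
  rw [PySem.List.length_pyRange_one]
  congr 1
  apply Eq.trans (b := (PySem.List.pyRange 0 10 1).map (fun k =>
    stripGo (PySem.Chars.slice html.toList (some (findnthA html.toList pvTitleMarker k))
      (some (findnthA html.toList pvArtistMarker k - 20)))
      (PySem.Chars.find (PySem.Chars.slice html.toList (some (findnthA html.toList pvTitleMarker k))
        (some (findnthA html.toList pvArtistMarker k - 20))) ['\n'])))
  · apply List.map_congr_left
    intro k hk
    have hmem := PySem.List.mem_pyRange_one.mp hk
    obtain ⟨i, rfl⟩ := Int.eq_ofNat_of_zero_le hmem.1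
    rw [PySem.List.pyGetD_map_pyRange_of_nonneg _ 10 _ _ (by omega) hmem.2,
      PySem.List.pyGetD_map_pyRange_of_nonneg _ 10 _ _ (by omega) hmem.2]
  · rw [PySem.List.pyRange_one, List.map_map,
      show ((10 : Int) - 0).toNat = 10 from rfl]
    apply List.map_congr_left
    intro k hk
    rw [List.mem_range] at hk
    simp only [Function.comp_apply, zero_add, Nat.zero_add]
    rw [pvSong, ← pvIter_findnth html.toList pvTitleMarker pvMarkerT_ne k,
      ← pvIter_findnth html.toList pvArtistMarker pvMarkerA_ne k]
    rw [strip_eq_proof]
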